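-- pv_equiv track=rewrite | github.com/hdesai17/Digest_It | app/main.py | chymotrypsin_digest
-- ===== SOURCE A (Python) =====
-- def chymotrypsin_digest(protein_sequence):
--     peptides = []
--     # Split the sequence after each occurrence of F, Y, W, or L (aromatic amino acids)
--     cutsites = [0] + [i+1 for i, aa in enumerate(protein_sequence) if aa in ('F', 'Y', 'W', 'L')]
--     for i in range(len(cutsites)-1):
--         peptide = protein_sequence[cutsites[i]:cutsites[i+1]]
--         peptides.append(peptide)
--
--     # Add N-terminal and C-terminal peptides
--     if cutsites:
--         # N-terminal peptide
--         n_terminal_peptide = protein_sequence[:cutsites[0]]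
--         peptides.insert(0, n_terminal_peptide)
--
--         # C-terminal peptide
--         c_terminal_peptide = protein_sequence[cutsites[-1]:]
--         peptides.append(c_terminal_peptide)
--
--     return [peptide for peptide in peptides if peptide]
-- ===== SOURCE B (Python) =====
-- def chymotrypsin_digest(protein_sequence):
--     # One pass with a growing buffer; flush after each aromatic residue (F/Y/W/L).
--     peptides = []
--     buf = ""
--     for aa in protein_sequence:
--         buf += aa
--         if aa in ('F', 'Y', 'W', 'L'):
--             peptides.append(buf)
--             buf = ""
--     if buf:
--         peptides.append(buf)
--     return peptides
-- ===== Notes on version B (the rewrite author's own statement) =====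
-- stated objective: simpler
-- what changed: Replaced the cutsite-index list plus slicing loop and final emptiness filter by a single forward pass with a peptide buffer that is flushed after each aromatic residue, so empty peptides are never produced.
import Mathlib
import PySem

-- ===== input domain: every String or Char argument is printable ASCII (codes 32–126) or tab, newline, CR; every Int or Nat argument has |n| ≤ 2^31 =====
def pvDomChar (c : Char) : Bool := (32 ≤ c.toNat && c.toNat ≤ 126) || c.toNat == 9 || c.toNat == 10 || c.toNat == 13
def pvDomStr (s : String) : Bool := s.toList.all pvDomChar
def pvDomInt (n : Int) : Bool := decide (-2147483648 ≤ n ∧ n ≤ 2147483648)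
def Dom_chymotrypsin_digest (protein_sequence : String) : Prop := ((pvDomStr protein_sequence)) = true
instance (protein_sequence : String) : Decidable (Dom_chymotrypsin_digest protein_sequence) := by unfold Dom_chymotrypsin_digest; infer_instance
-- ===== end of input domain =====

-- B replaces A's cutsite-index list, slicing loop and final emptiness filter by one
-- forward pass with a peptide buffer flushed after each aromatic residue (objective: simpler).

-- ===== PORT A =====
def pvArom (c : Char) : Bool := c == 'F' || c == 'Y' || c == 'W' || c == 'L'

def chymotrypsin_digest (protein_sequence : String) : List String :=
  let cs := protein_sequence.toList
  let cutsites : List Int :=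
    0 :: (PySem.List.enumerate cs 0).filterMap
      (fun p => if pvArom p.2 then some (p.1 + 1) else none)
  let peptides : List (List Char) :=
    (List.range (cutsites.length - 1)).map (fun i =>
      PySem.List.slice cs (some (cutsites.getD i 0)) (some (cutsites.getD (i+1) 0)))
  let peptides :=
    if cutsites.isEmpty then peptides
    else
      PySem.List.slice cs none (some (cutsites.getD 0 0)) ::
        (peptides ++ [PySem.List.slice cs (some (PySem.List.pyGetD cutsites (-1) 0)) none])
  (peptides.filter (fun p => !p.isEmpty)).map String.ofList

-- ===== PORT B =====
def pvDigestLoop : List Char → List Char → List (List Char) → List (List Char)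
  | [], buf, acc => if buf.isEmpty then acc else acc ++ [buf]
  | c :: rest, buf, acc =>
    if pvArom c then pvDigestLoop rest [] (acc ++ [buf ++ [c]])
    else pvDigestLoop rest (buf ++ [c]) acc

def chymotrypsin_digest_alt (protein_sequence : String) : List String :=
  (pvDigestLoop protein_sequence.toList [] []).map String.ofList

-- ===== PRECONDITION & SPEC =====
def Spec_chymotrypsin_digest (protein_sequence : String) (out : List String) : Prop := out = chymotrypsin_digest_alt protein_sequence
instance (protein_sequence : String) (out : List String) : Decidable (Spec_chymotrypsin_digest protein_sequence out) := by unfold Spec_chymotrypsin_digest; infer_instance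

-- ===== CLAIM (what is proved, stated in full; the proofs are below) =====
def Claim_equal_chymotrypsin_digest : Prop := ∀ (protein_sequence : String), Dom_chymotrypsin_digest protein_sequence → Spec_chymotrypsin_digest protein_sequence (chymotrypsin_digest protein_sequence)

-- ===== LEMMAS AND PROOFS =====

-- Reference recursive splitter: the nonempty peptides; the first peptide ends at the first aromatic.
def pvRef : List Char → List (List Char)
  | [] => []
  | c :: cs =>
    if pvArom c then [c] :: pvRef cs
    else
      match pvRef cs with
      | [] => [[c]]
      | p :: ps => (c :: p) :: ps

-- Nat-valued cut positions after position 0 (i+1 for each aromatic at index i).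
def pvNatSites : List Char → List Nat
  | [] => []
  | c :: cs => (if pvArom c then [1] else []) ++ (pvNatSites cs).map (· + 1)

-- The peptides A's loop slices out, plus the tail slice, over a Nat cut list.
def pvPieces (cs : List Char) : List Nat → List (List Char)
  | [] => []
  | [a] => [cs.drop a]
  | a :: b :: t => (cs.drop a).take (b - a) :: pvPieces cs (b :: t)

theorem pvEnum_shift (cs : List Char) (k : Int) :
    PySem.List.enumerate cs (k + 1) = (PySem.List.enumerate cs k).map (fun p => (p.1 + 1, p.2)) := by
  induction cs generalizing k with
  | nil => simp [PySem.List.enumerate_nil]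
  | cons c cs ih =>
    simp [PySem.List.enumerate_cons, ih (k + 1)]

theorem pvSites_eq (cs : List Char) :
    (PySem.List.enumerate cs 0).filterMap
      (fun p => if pvArom p.2 then some (p.1 + 1) else none)
      = (pvNatSites cs).map (fun n : Nat => (n : Int)) := by
  induction cs with
  | nil => simp [PySem.List.enumerate_nil, pvNatSites]
  | cons c cs ih =>
    have hcast : ∀ ns : List Nat,
        (ns.map (fun n => n + 1)).map (fun n : Nat => (n : Int))
          = (ns.map (fun n : Nat => (n : Int))).map (fun z => z + 1) := by
      intro ns; simp only [List.map_map]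
      exact List.map_congr_left (fun n _ => by simp)
    rw [PySem.List.enumerate_cons, show (0:Int) + 1 = 0 + 1 by ring, pvEnum_shift]
    simp only [List.filterMap_cons, List.filterMap_map, pvNatSites]
    have hc : ((fun p : Int × Char => if pvArom p.2 then some (p.1 + 1) else none) ∘ (fun p : Int × Char => (p.1 + 1, p.2)))
        = fun p : Int × Char => ((if pvArom p.2 then some (p.1 + 1) else none).map (· + 1)) := by
      funext p; by_cases h : pvArom p.2 <;> simp [h]
    rw [hc, ← List.map_filterMap, ih, ← hcast]
    by_cases h : pvArom c <;> simp [h]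

theorem pvRange_pairs {β : Type} (g : Int → Int → β) (l : List Int) :
    (List.range (l.length - 1)).map (fun i => g (l.getD i 0) (l.getD (i+1) 0))
      = (l.zip l.tail).map (fun p => g p.1 p.2) := by
  induction l with
  | nil => simp
  | cons a l ih =>
    cases l with
    | nil => simp
    | cons b t =>
      rw [show (a :: b :: t).length - 1 = (b :: t).length - 1 + 1 from by
            simp only [List.length_cons]; omega,
        List.range_succ_eq_map]
      simp only [List.map_cons, List.map_map, List.zip_cons_cons, List.tail_cons]
      have hf : ((fun i => g ((a::b::t).getD i 0) ((a::b::t).getD (i+1) 0)) ∘ Nat.succ)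
          = fun i => g ((b::t).getD i 0) ((b::t).getD (i+1) 0) := by
        funext i; simp [Function.comp]
      rw [hf, ih]
      simp

theorem pvPieces_shift (c : Char) (cs : List Char) (l : List Nat) :
    pvPieces (c :: cs) (l.map (· + 1)) = pvPieces cs l := by
  induction l with
  | nil => rfl
  | cons a l ih =>
    cases l with
    | nil => simp [pvPieces]
    | cons b t =>
      simp only [List.map_cons, pvPieces] at ih ⊢
      rw [ih]
      congr 1
      simp [Nat.add_sub_add_right]

theorem pvNatSites_pos (cs : List Char) : ∀ x ∈ pvNatSites cs, 1 ≤ x := by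
  induction cs with
  | nil => simp [pvNatSites]
  | cons c cs ih =>
    intro x hx
    simp only [pvNatSites, List.mem_append, List.mem_map] at hx
    rcases hx with hx | ⟨y, _, rfl⟩
    · split at hx <;> simp_all
    · omega

theorem pvPieces_filter (cs : List Char) :
    (pvPieces cs (0 :: pvNatSites cs)).filter (fun p => !p.isEmpty) = pvRef cs := by
  induction cs with
  | nil => simp [pvNatSites, pvPieces, pvRef]
  | cons c cs ih =>
    by_cases h : pvArom c
    · have hs : pvNatSites (c :: cs) = 1 :: (pvNatSites cs).map (· + 1) := by
        simp [pvNatSites, h]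
      rw [hs, show (0 : Nat) :: 1 :: (pvNatSites cs).map (· + 1)
            = 0 :: ((0 :: pvNatSites cs).map (· + 1)) from by simp]
      rw [show pvPieces (c :: cs) (0 :: (0 :: pvNatSites cs).map (· + 1))
            = ((c :: cs).drop 0).take 1 :: pvPieces (c :: cs) ((0 :: pvNatSites cs).map (· + 1))
          from rfl, pvPieces_shift]
      simp [pvRef, h, ih]
    · have hs : pvNatSites (c :: cs) = (pvNatSites cs).map (· + 1) := by simp [pvNatSites, h]
      rw [hs]
      cases hns : pvNatSites cs with
      | nil =>
        have hcs : pvRef cs = (pvPieces cs [0]).filter (fun p => !p.isEmpty) := by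
          rw [← ih, hns]
        simp only [pvPieces, List.drop_zero] at hcs
        simp only [List.map_nil, pvPieces, List.drop_zero]
        cases cs with
        | nil => simp [pvRef, h]
        | cons d ds =>
          rw [pvRef]
          simp only [h, Bool.false_eq_true, if_false]
          rw [hcs]
          simp [List.filter]
      | cons m t =>
        have hm : 1 ≤ m := pvNatSites_pos cs m (by rw [hns]; simp)
        have hcs' : cs ≠ [] := by
          intro hc; rw [hc] at hns; simp [pvNatSites] at hns
        rw [show ((m :: t).map (· + 1) : List Nat) = (m+1) :: t.map (· + 1) from by simp]
        rw [show pvPieces (c :: cs) (0 :: (m+1) :: t.map (· + 1))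
              = ((c :: cs).drop 0).take (m + 1 - 0) :: pvPieces (c :: cs) ((m :: t).map (· + 1))
            from by simp [pvPieces], pvPieces_shift]
        rw [hns] at ih
        rw [show pvPieces cs (0 :: m :: t)
              = (cs.drop 0).take (m - 0) :: pvPieces cs (m :: t) from by simp [pvPieces]] at ih
        obtain ⟨d, ds, rfl⟩ : ∃ d ds, cs = d :: ds := by
          cases cs with | nil => exact absurd rfl hcs' | cons d ds => exact ⟨d, ds, rfl⟩
        have htake : ((d :: ds).take m).isEmpty = false := by
          cases m with | zero => omega | succ m => simp
        simp only [List.drop_zero, Nat.sub_zero, List.filter_cons, htake] at ih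
        simp only [List.drop_zero, Nat.sub_zero, List.take_succ_cons, List.filter_cons]
        simp only [Bool.not_false, List.isEmpty_cons, if_true]
        rw [pvRef]
        simp only [h, Bool.false_eq_true, if_false]
        rw [← ih]
        rfl

theorem pvGetD_neg_one (a : Int) (l : List Int) :
    PySem.List.pyGetD (a :: l) (-1) 0 = (a :: l).getLast (by simp) := by
  simp [PySem.List.pyGetD, PySem.List.pyGet?_neg_one, List.getLast?_eq_some_getLast]

theorem pvZipSlices (cs : List Char) (l : List Nat) (h : l ≠ []) :
    (((l.map (fun n : Nat => (n:Int))).zip ((l.map (fun n : Nat => (n:Int))).tail)).map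
        (fun p => PySem.List.slice cs (some p.1) (some p.2)))
      ++ [PySem.List.slice cs
            (some (PySem.List.pyGetD (l.map (fun n : Nat => (n:Int))) (-1) 0)) none]
      = pvPieces cs l := by
  induction l with
  | nil => exact absurd rfl h
  | cons a l ih =>
    cases l with
    | nil =>
      simp only [List.map_cons, List.map_nil, List.tail_cons, List.zip_nil_right,
        List.nil_append, pvGetD_neg_one, List.getLast_singleton]
      rw [PySem.List.slice_from_natCast, pvPieces]
    | cons b t =>
      simp only [List.map_cons, List.tail_cons, List.zip_cons_cons,
        List.cons_append, pvPieces]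
      simp only [List.map_cons, List.tail_cons] at ih
      congr 1
      · rw [PySem.List.slice_natCast]
      · rw [show PySem.List.pyGetD ((a:Int) :: (b:Int) :: t.map (fun n : Nat => (n:Int))) (-1) 0
              = PySem.List.pyGetD ((b:Int) :: t.map (fun n : Nat => (n:Int))) (-1) 0 from by
            rw [pvGetD_neg_one, pvGetD_neg_one, List.getLast_cons]]
        exact ih (by simp)

theorem pvA_eq (s : String) :
    chymotrypsin_digest s = (pvRef s.toList).map String.ofList := by
  unfold chymotrypsin_digest
  dsimp only
  rw [pvSites_eq s.toList]
  rw [show (0:Int) :: (pvNatSites s.toList).map (fun n : Nat => (n:Int))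
        = (0 :: pvNatSites s.toList).map (fun n : Nat => (n:Int)) from by simp]
  rw [pvRange_pairs (fun x y => PySem.List.slice s.toList (some x) (some y))]
  rw [show ((0 :: pvNatSites s.toList).map (fun n : Nat => (n:Int))).isEmpty = false from by simp]
  simp only [Bool.false_eq_true, if_false]
  rw [show ((0 :: pvNatSites s.toList).map (fun n : Nat => (n:Int))).getD 0 0 = (0:Int) from by simp]
  rw [show PySem.List.slice s.toList none (some (0:Int)) = [] from by
    rw [show (0:Int) = ((0:Nat):Int) from by simp, PySem.List.slice_to_natCast]; simp]
  rw [List.filter_cons]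
  simp only [List.isEmpty_nil, Bool.not_true, Bool.false_eq_true, if_false]
  rw [pvZipSlices s.toList (0 :: pvNatSites s.toList) (by simp), pvPieces_filter]

theorem pvLoop_eq (cs : List Char) (buf : List Char) (acc : List (List Char)) :
    pvDigestLoop cs buf acc
      = acc ++ (match pvRef cs with
          | [] => if buf.isEmpty then [] else [buf]
          | p :: ps => (buf ++ p) :: ps) := by
  induction cs generalizing buf acc with
  | nil => cases buf <;> simp [pvDigestLoop, pvRef]
  | cons c cs ih =>
    by_cases h : pvArom c
    · simp only [pvDigestLoop, h, if_true, ih, pvRef]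
      simp
      cases pvRef cs <;> simp
    · simp only [pvDigestLoop, h, Bool.false_eq_true, if_false, ih, pvRef]
      cases hr : pvRef cs with
      | nil => simp
      | cons p ps => simp

theorem pvAlt_eq (s : String) :
    chymotrypsin_digest_alt s = (pvRef s.toList).map String.ofList := by
  unfold chymotrypsin_digest_alt
  rw [pvLoop_eq]
  cases pvRef s.toList <;> simp

-- ===== VERDICT (by name: the statement is the Claim_ definition above) =====
theorem chymotrypsin_digest_spec : Claim_equal_chymotrypsin_digest := by
  intro s _
  unfold Spec_chymotrypsin_digest
  rw [pvA_eq, pvAlt_eq]
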